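-- pv_equiv track=rewrite | github.com/donghui-0126/StoryQuant | src/analysis/leaderboard.py | _max_streak
-- ===== SOURCE A (Python) =====
-- def _max_streak(results: list[int], target: int) -> int:
--     """Find max consecutive occurrences of target in results."""
--     max_s = current = 0
--     for r in results:
--         if r == target:
--             current += 1
--             max_s = max(max_s, current)
--         else:
--             current = 0
--     return max_s
-- ===== SOURCE B (Python) =====
-- def _max_streak(results: list[int], target: int) -> int:
--     """Find max consecutive occurrences of target in results."""
--     bounds = [-1]
--     bounds += [i for i, r in enumerate(results) if r != target]
--     bounds.append(len(results))
--     return max(b - a - 1 for a, b in zip(bounds, bounds[1:]))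
-- ===== Notes on version B (the rewrite author's own statement) =====
-- stated objective: alternative
-- what changed: Instead of a running counter reset on mismatches, B builds the list of indices of non-target elements (with -1 and len(results) as sentinel boundaries) and returns the maximum gap between consecutive boundaries minus one.
import Mathlib
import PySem

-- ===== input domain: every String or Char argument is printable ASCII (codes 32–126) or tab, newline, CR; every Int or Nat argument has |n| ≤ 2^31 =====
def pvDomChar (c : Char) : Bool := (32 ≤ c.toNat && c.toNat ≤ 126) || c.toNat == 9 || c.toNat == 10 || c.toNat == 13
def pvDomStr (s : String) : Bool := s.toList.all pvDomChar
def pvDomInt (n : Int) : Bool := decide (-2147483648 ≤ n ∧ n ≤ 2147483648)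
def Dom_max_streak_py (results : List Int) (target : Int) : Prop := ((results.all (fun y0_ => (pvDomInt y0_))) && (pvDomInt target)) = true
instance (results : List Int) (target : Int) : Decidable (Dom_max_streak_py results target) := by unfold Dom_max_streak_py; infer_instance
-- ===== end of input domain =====

-- B replaces A's running-counter-with-reset scan by a boundary-gap computation: collect the
-- indices of non-target elements (with -1 and len as sentinels) and take the maximum gap
-- between consecutive boundaries minus one ("alternative": same O(n) cost, different algorithm).


-- ===== PORT A =====
-- literal port: fold carrying (max_s, current); branch order as in the Python
def max_streak_py (results : List Int) (target : Int) : Int :=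
  (results.foldl
    (fun s r => if r = target then (max s.1 (s.2 + 1), s.2 + 1) else (s.1, 0))
    (0, 0)).1

-- ===== PORT B =====
-- [i for i, r in enumerate(results) if r != target], indices counted from i
def nonTargetIdxs (target : Int) (i : Int) (xs : List Int) : List Int :=
  match xs with
  | [] => []
  | x :: rest =>
      if x ≠ target then i :: nonTargetIdxs target (i + 1) rest
      else nonTargetIdxs target (i + 1) rest

-- max(b - a - 1 for a, b in zip(bounds, bounds[1:])); bounds always has ≥ 2 elements,
-- so Python's max is over a nonempty generator (the [] branch is unreachable)
def max_streak_py_alt (results : List Int) (target : Int) : Int :=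
  let bounds : List Int := -1 :: (nonTargetIdxs target 0 results ++ [(results.length : Int)])
  match (bounds.zip bounds.tail).map (fun p => p.2 - p.1 - 1) with
  | [] => 0
  | d :: rest => rest.foldl max d

-- ===== PRECONDITION & SPEC =====
def Spec_max_streak_py (results : List Int) (target : Int) (out : Int) : Prop := out = max_streak_py_alt results target
instance (results : List Int) (target : Int) (out : Int) : Decidable (Spec_max_streak_py results target out) := by unfold Spec_max_streak_py; infer_instance

-- ===== CLAIM (what is proved, stated in full; the proofs are below) =====
def Claim_equal_max_streak_py : Prop := ∀ (results : List Int) (target : Int), Dom_max_streak_py results target → Spec_max_streak_py results target (max_streak_py results target)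

-- ===== LEMMAS AND PROOFS =====

-- A's loop step
def stepA (t : Int) (s : Int × Int) (r : Int) : Int × Int :=
  if r = t then (max s.1 (s.2 + 1), s.2 + 1) else (s.1, 0)

-- the gap list B computes, described recursively: prev = last boundary, pos = current index
def gapsSpec (t prev pos : Int) (xs : List Int) : List Int :=
  match xs with
  | [] => [pos - prev - 1]
  | x :: rest =>
      if x = t then gapsSpec t prev (pos + 1) rest
      else (pos - prev - 1) :: gapsSpec t pos (pos + 1) rest

-- maximum of a nonempty list, in the shape B's match produces
def maxL (l : List Int) : Int :=
  match l with
  | [] => 0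
  | d :: rest => rest.foldl max d

def diffsOf (bs : List Int) : List Int :=
  (bs.zip bs.tail).map (fun p => p.2 - p.1 - 1)

lemma diffs_cons2 (a b : Int) (l : List Int) :
    diffsOf (a :: b :: l) = (b - a - 1) :: diffsOf (b :: l) := rfl

-- bridge: B's diff list is gapsSpec
lemma bridgeB (t : Int) (xs : List Int) : ∀ prev pos : Int,
    diffsOf (prev :: (nonTargetIdxs t pos xs ++ [pos + (xs.length : Int)]))
      = gapsSpec t prev pos xs := by
  induction xs with
  | nil => intro prev pos; simp [nonTargetIdxs, gapsSpec, diffsOf]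
  | cons x rest ih =>
      intro prev pos
      have hlen : pos + ((x :: rest).length : Int) = (pos + 1) + (rest.length : Int) := by
        simp [List.length_cons]; ring
      by_cases hx : x = t
      · rw [gapsSpec, if_pos hx, nonTargetIdxs, if_neg (by simp [hx]), hlen]
        exact ih prev (pos + 1)
      · rw [gapsSpec, if_neg hx, nonTargetIdxs, if_pos (by simp [hx]), hlen]
        rw [List.cons_append, diffs_cons2]
        rw [ih pos (pos + 1)]

lemma gapsSpec_ne_nil (t prev pos : Int) (xs : List Int) : gapsSpec t prev pos xs ≠ [] := by
  induction xs generalizing prev pos with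
  | nil => simp [gapsSpec]
  | cons x rest ih =>
      by_cases hx : x = t
      · rw [gapsSpec, if_pos hx]; exact ih prev (pos + 1)
      · rw [gapsSpec, if_neg hx]; simp

lemma foldl_max_init (r : List Int) : ∀ c d : Int, r.foldl max (max c d) = max c (r.foldl max d) := by
  induction r with
  | nil => intro c d; rfl
  | cons e r ih =>
      intro c d
      simp only [List.foldl_cons]
      rw [max_assoc, ih]

lemma maxL_cons (c : Int) (l : List Int) (h : l ≠ []) : maxL (c :: l) = max c (maxL l) := by
  cases l with
  | nil => exact absurd rfl h
  | cons d r => simp only [maxL, List.foldl_cons]; exact foldl_max_init r c d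

-- first gap emitted is at least the current run length
lemma maxL_gaps_ge (t : Int) (xs : List Int) : ∀ prev pos : Int,
    pos - prev - 1 ≤ maxL (gapsSpec t prev pos xs) := by
  induction xs with
  | nil => intro prev pos; simp [gapsSpec, maxL]
  | cons x rest ih =>
      intro prev pos
      by_cases hx : x = t
      · rw [gapsSpec, if_pos hx]
        have := ih prev (pos + 1)
        omega
      · rw [gapsSpec, if_neg hx, maxL_cons _ _ (gapsSpec_ne_nil t pos (pos + 1) rest)]
        omega

-- main invariant: A's fold equals max of the remaining gaps
lemma main_lemma (t : Int) (xs : List Int) : ∀ (m prev pos : Int),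
    0 ≤ pos - prev - 1 → pos - prev - 1 ≤ m →
    (xs.foldl (stepA t) (m, pos - prev - 1)).1 = max m (maxL (gapsSpec t prev pos xs)) := by
  induction xs with
  | nil =>
      intro m prev pos h0 hm
      simp only [List.foldl_nil, gapsSpec, maxL, List.foldl_nil]
      omega
  | cons x rest ih =>
      intro m prev pos h0 hm
      by_cases hx : x = t
      · have hstep : stepA t (m, pos - prev - 1) x
            = (max m (pos - prev - 1 + 1), pos - prev - 1 + 1) := by simp [stepA, hx]
        rw [List.foldl_cons, hstep, gapsSpec, if_pos hx]
        have harg : pos - prev - 1 + 1 = (pos + 1) - prev - 1 := by ring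
        rw [harg]
        rw [ih (max m ((pos + 1) - prev - 1)) prev (pos + 1) (by omega) (le_max_right _ _)]
        have := maxL_gaps_ge t rest prev (pos + 1)
        omega
      · have hstep : stepA t (m, pos - prev - 1) x = (m, 0) := by simp [stepA, hx]
        rw [List.foldl_cons, hstep, gapsSpec, if_neg hx]
        have h0' : (0 : Int) = (pos + 1) - pos - 1 := by ring
        rw [h0', ih m pos (pos + 1) (by omega) (by omega)]
        rw [maxL_cons _ _ (gapsSpec_ne_nil t pos (pos + 1) rest)]
        omega

-- ===== VERDICT (by name: the statement is the Claim_ definition above) =====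
theorem max_streak_py_spec : Claim_equal_max_streak_py := by
  intro results target _
  unfold Spec_max_streak_py max_streak_py max_streak_py_alt
  have hA : (results.foldl
      (fun s r => if r = target then (max s.1 (s.2 + 1), s.2 + 1) else (s.1, 0)) (0, 0)).1
      = (results.foldl (stepA target) (0, (0:Int) - (-1) - 1)).1 := by norm_num; rfl
  rw [hA, main_lemma target results 0 (-1) 0 (by omega) (by omega)]
  have hb := bridgeB target results (-1) 0
  simp only [zero_add] at hb
  have hmatch :
      (match diffsOf (-1 :: (nonTargetIdxs target 0 results ++ [(results.length : Int)])) with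
        | [] => (0:Int)
        | d :: rest => rest.foldl max d)
      = maxL (gapsSpec target (-1) 0 results) := by
    rw [hb]; cases h : gapsSpec target (-1) 0 results with
    | nil => exact absurd h (gapsSpec_ne_nil _ _ _ _)
    | cons d rest => simp [maxL]
  have hge := maxL_gaps_ge target results (-1) 0
  simp only [diffsOf] at hmatch
  rw [hmatch]
  omega
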